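-- pv_equiv track=rewrite | github.com/tlian25/advent-of-code-2023 | python/day13_point_of_incidence.py | find_mirror_col
-- ===== SOURCE A (Python) =====
-- def expand_col(r, c, grid) -> int:
--     row = grid[r]
--     i, j = c, c+1
--     diffs = 0
--     while i >= 0 and j < len(row):
--         if row[i] != row[j]:
--             diffs += 1
--         i -= 1
--         j += 1
--     return diffs
--
-- def find_mirror_col(grid) -> int:
--     for c in range(len(grid[0])-1):
--         valid = True
--         for r in range(len(grid)):
--             if expand_col(r, c, grid) != 0:
--                valid = False
--                break
--         if valid: return c
--     return -1
-- ===== SOURCE B (Python) =====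
-- def _reflects(row, c):
--     left = row[:c+1][::-1]
--     right = row[c+1:]
--     n = min(len(left), len(right))
--     return left[:n] == right[:n]
--
-- def find_mirror_col(grid):
--     candidates = list(range(len(grid[0]) - 1))
--     for row in grid:
--         candidates = [c for c in candidates if _reflects(row, c)]
--     return candidates[0] if candidates else -1
-- ===== Notes on version B (the rewrite author's own statement) =====
-- stated objective: alternative
-- what changed: Column-major search (for each candidate column, re-scan every row with a two-pointer expansion and early break) is replaced by a row-major single pass that filters a candidate-column list per row using slice/palindrome comparison and returns the first survivor.
-- outside the precondition, e.g. on find_mirror_col([]): A raises IndexError, B raises IndexError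
import Mathlib
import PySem

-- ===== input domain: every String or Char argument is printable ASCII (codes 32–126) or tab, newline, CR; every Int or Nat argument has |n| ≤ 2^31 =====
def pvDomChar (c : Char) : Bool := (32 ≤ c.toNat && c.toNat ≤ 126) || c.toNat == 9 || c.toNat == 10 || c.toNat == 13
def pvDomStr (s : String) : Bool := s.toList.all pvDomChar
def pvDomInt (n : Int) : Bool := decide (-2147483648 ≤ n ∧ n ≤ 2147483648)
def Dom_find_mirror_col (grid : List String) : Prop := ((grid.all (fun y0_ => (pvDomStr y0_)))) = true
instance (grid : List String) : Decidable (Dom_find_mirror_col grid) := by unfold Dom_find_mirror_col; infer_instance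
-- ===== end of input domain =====

-- B replaces A's column-major search (for each column, re-scan every row with a two-pointer
-- expansion) by a row-major single filtering pass over a candidate list, testing reflection by
-- slice comparison; same asymptotic cost, different structure (objective: alternative).

-- ===== PORT A =====
-- the while loop of expand_col: i walks left, j walks right, counting mismatches
def pvExpandLoop (row : List Char) (i j diffs : Int) : Int :=
  if h : 0 ≤ i ∧ j < (row.length : Int) then
    pvExpandLoop row (i - 1) (j + 1)
      (if PySem.List.pyGet? row i ≠ PySem.List.pyGet? row j then diffs + 1 else diffs)
  else diffs
termination_by (i + 1).toNat
decreasing_by omega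

def expand_col (r c : Int) (grid : List String) : Int :=
  match PySem.List.pyGet? grid r with
  | some row => pvExpandLoop row.toList c (c + 1) 0
  | none => 0    -- unreachable: callers pass r ∈ range(len(grid))

-- inner 'for r in range(len(grid))' with its early break
def pvRowsLoop (grid : List String) (c : Int) (rs : List Int) : Bool :=
  match rs with
  | [] => true
  | r :: rest => if expand_col r c grid ≠ 0 then false else pvRowsLoop grid c rest

-- outer 'for c in range(len(grid[0])-1)' returning the first valid c
def pvColsLoop (grid : List String) (cs : List Int) : Int :=
  match cs with
  | [] => -1
  | c :: rest =>
    if pvRowsLoop grid c (PySem.List.pyRange 0 (grid.length : Int) 1) then c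
    else pvColsLoop grid rest

def find_mirror_col (grid : List String) : Int :=
  match PySem.List.pyGet? grid 0 with
  | none => -1    -- unreachable: Python raises IndexError on [], excluded by Pre_
  | some r0 => pvColsLoop grid (PySem.List.pyRange 0 (PySem.Str.len r0 - 1) 1)

-- ===== PORT B =====
-- _reflects(row, c): left = row[:c+1][::-1]; right = row[c+1:]; n = min; left[:n] == right[:n]
def pvReflects (row : List Char) (c : Int) : Bool :=
  let left := (PySem.List.slice row none (some (c + 1))).reverse
  let right := PySem.List.slice row (some (c + 1)) none
  let n : Nat := min left.length right.length
  left.take n == right.take n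

def find_mirror_col_alt (grid : List String) : Int :=
  match PySem.List.pyGet? grid 0 with
  | none => -1    -- unreachable: B's Python also raises on [], excluded by Pre_
  | some r0 =>
    let final := grid.foldl
      (fun cand row => cand.filter (fun c => pvReflects row.toList c))
      (PySem.List.pyRange 0 (PySem.Str.len r0 - 1) 1)
    match final with
    | [] => -1
    | c :: _ => c

-- ===== PRECONDITION & SPEC =====
-- Python A evaluates grid[0] first: on the empty list it raises IndexError, so [] is excluded.
def Pre_find_mirror_col (grid : List String) : Prop := grid ≠ []
instance (grid : List String) : Decidable (Pre_find_mirror_col grid) := by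
  unfold Pre_find_mirror_col; infer_instance
def pvWitness_find_mirror_col : List String := ["#..#.", "....#"]

def Spec_find_mirror_col (grid : List String) (out : Int) : Prop := out = find_mirror_col_alt grid
instance (grid : List String) (out : Int) : Decidable (Spec_find_mirror_col grid out) := by
  unfold Spec_find_mirror_col; infer_instance

-- ===== CLAIM (what is proved, stated in full; the proofs are below) =====
def Claim_equal_find_mirror_col : Prop := ∀ (grid : List String), Dom_find_mirror_col grid → Pre_find_mirror_col grid → Spec_find_mirror_col grid (find_mirror_col grid)

-- ===== LEMMAS AND PROOFS =====

-- mismatch count never decreases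
theorem pvExpandLoop_ge (row : List Char) (i j d : Int) : d ≤ pvExpandLoop row i j d := by
  fun_induction pvExpandLoop row i j d with
  | case1 i j d h ih =>
    by_cases hm : PySem.List.pyGet? row i ≠ PySem.List.pyGet? row j
    · simp only [dif_pos hm, if_pos hm] at ih ⊢; omega
    · simp only [dif_neg hm, if_neg hm] at ih ⊢; omega
  | case2 i j d h => exact le_refl d

-- the loop adds nothing to d iff every in-range mirrored pair matches
theorem pvExpandLoop_eq_iff (row : List Char) (i j d : Int) :
    pvExpandLoop row i j d = d ↔
      ∀ k : Nat, 0 ≤ i - k → j + k < (row.length : Int) →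
        PySem.List.pyGet? row (i - k) = PySem.List.pyGet? row (j + k) := by
  fun_induction pvExpandLoop row i j d with
  | case1 i j d h ih =>
    by_cases hm : PySem.List.pyGet? row i ≠ PySem.List.pyGet? row j
    · simp only [dif_pos hm, if_pos hm] at ih ⊢
      constructor
      · intro hL
        exfalso
        have := pvExpandLoop_ge row (i - 1) (j + 1) (d + 1)
        omega
      · intro hR
        exfalso
        have h0 := hR 0 (by push_cast; omega) (by push_cast; omega)
        simp only [Nat.cast_zero, sub_zero, add_zero] at h0
        exact hm h0
    · simp only [dif_neg hm, if_neg hm] at ih ⊢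
      push_neg at hm
      rw [ih]
      constructor
      · intro hR k hk1 hk2
        cases k with
        | zero => simpa using hm
        | succ k' =>
          have e1 : i - ((k' + 1 : Nat) : Int) = (i - 1) - (k' : Int) := by push_cast; ring
          have e2 : j + ((k' + 1 : Nat) : Int) = (j + 1) + (k' : Int) := by push_cast; ring
          rw [e1, e2]
          exact hR k' (by omega) (by omega)
      · intro hR k hk1 hk2
        have e1 : (i - 1) - (k : Int) = i - ((k + 1 : Nat) : Int) := by push_cast; ring
        have e2 : (j + 1) + (k : Int) = j + ((k + 1 : Nat) : Int) := by push_cast; ring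
        rw [e1, e2]
        exact hR (k + 1) (by push_cast; omega) (by push_cast; omega)
  | case2 i j d h =>
    constructor
    · intro _ k hk1 hk2
      exfalso
      push_neg at h
      rcases lt_or_ge i 0 with hi | hi
      · have : (0:Int) ≤ (k : Int) := Int.natCast_nonneg k
        omega
      · have := h hi
        omega
    · intro _; rfl

-- B's slice test agrees with A's expansion on any single row (0 ≤ c)
theorem pvReflects_eq (row : List Char) (c : Int) (hc : 0 ≤ c) :
    pvReflects row c = (pvExpandLoop row c (c + 1) 0 == 0) := by
  apply Bool.coe_iff_coe.mp
  obtain ⟨cn, rfl⟩ := Int.eq_ofNat_of_zero_le hc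
  have hcast : ((cn : Int) + 1) = ((cn + 1 : Nat) : Int) := by push_cast; ring
  simp only [pvReflects, hcast, PySem.List.slice_to_natCast, PySem.List.slice_from_natCast,
    List.length_reverse, List.length_take, List.length_drop, beq_iff_eq]
  rw [pvExpandLoop_eq_iff]
  set L := row.length with hL
  set n : Nat := min (min (cn + 1) L) (L - (cn + 1)) with hn
  constructor
  · intro hEq k hk1 hk2
    have hk1' : k ≤ cn := by omega
    have hk2' : cn + 1 + k < L := by omega
    have hkn : k < n := by omega
    have hthis := congrArg (fun l => l[k]?) hEq
    simp only [List.getElem?_take, if_pos hkn] at hthis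
    rw [List.getElem?_reverse (by simp only [List.length_take]; omega)] at hthis
    simp only [List.length_take] at hthis
    have hm : min (cn + 1) L - 1 - k = cn - k := by omega
    rw [hm, List.getElem?_take, if_pos (by omega), List.getElem?_drop] at hthis
    rw [PySem.List.pyGet?_of_nonneg row (show (0:Int) ≤ (cn : Int) - (k : Int) by omega),
        PySem.List.pyGet?_of_nonneg row (show (0:Int) ≤ ((cn + 1 : Nat) : Int) + (k : Int) by omega)]
    have e1 : ((cn : Int) - (k : Int)).toNat = cn - k := by omega
    have e2 : (((cn + 1 : Nat) : Int) + (k : Int)).toNat = cn + 1 + k := by omega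
    rw [e1, e2]
    exact hthis
  · intro hAll
    apply List.ext_getElem?_iff.mpr
    intro k
    simp only [List.getElem?_take]
    by_cases hkn : k < n
    · rw [if_pos hkn, if_pos hkn]
      have hk1' : k ≤ cn := by omega
      have hk2' : cn + 1 + k < L := by omega
      have hpy := hAll k (by omega) (by push_cast; omega)
      rw [PySem.List.pyGet?_of_nonneg row (show (0:Int) ≤ (cn : Int) - (k : Int) by omega),
          PySem.List.pyGet?_of_nonneg row (show (0:Int) ≤ ((cn + 1 : Nat) : Int) + (k : Int) by omega)] at hpy
      have e1 : ((cn : Int) - (k : Int)).toNat = cn - k := by omega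
      have e2 : (((cn + 1 : Nat) : Int) + (k : Int)).toNat = cn + 1 + k := by omega
      rw [e1, e2] at hpy
      rw [List.getElem?_reverse (by simp only [List.length_take]; omega)]
      simp only [List.length_take]
      have hm : min (cn + 1) L - 1 - k = cn - k := by omega
      rw [hm, List.getElem?_take, if_pos (by omega), List.getElem?_drop]
      exact hpy
    · rw [if_neg hkn, if_neg hkn]

-- the early-break row loop is List.all over the index list
theorem pvRowsLoop_eq_all (grid : List String) (c : Int) (rs : List Int) :
    pvRowsLoop grid c rs = rs.all (fun r => expand_col r c grid == 0) := by
  induction rs with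
  | nil => rfl
  | cons r rest ih =>
    simp only [pvRowsLoop, List.all_cons, ih]
    by_cases h : expand_col r c grid = 0 <;> simp [h]

-- the row loop over range(len(grid)) = B's per-row test over grid itself
theorem pvRowsLoop_eq_all_rows (grid : List String) (c : Int) (hc : 0 ≤ c) :
    pvRowsLoop grid c (PySem.List.pyRange 0 (grid.length : Int) 1)
      = grid.all (fun row => pvReflects row.toList c) := by
  rw [pvRowsLoop_eq_all]
  apply Bool.coe_iff_coe.mp
  rw [List.all_eq_true, List.all_eq_true]
  constructor
  · intro h row hrow
    obtain ⟨k, hk, hEq⟩ := List.mem_iff_getElem.mp hrow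
    have hmem : (k : Int) ∈ PySem.List.pyRange 0 (grid.length : Int) 1 :=
      PySem.List.mem_pyRange_one.mpr ⟨Int.natCast_nonneg k, by exact_mod_cast hk⟩
    have hr := h (k : Int) hmem
    have hget : PySem.List.pyGet? grid (k : Int) = some grid[k] := by
      rw [PySem.List.pyGet?_natCast]
      exact List.getElem?_eq_getElem hk
    simp only [expand_col, hget] at hr
    rw [pvReflects_eq _ _ hc, ← hEq]
    exact hr
  · intro h r hr
    obtain ⟨h1, h2⟩ := PySem.List.mem_pyRange_one.mp hr
    have hlt : r.toNat < grid.length := by omega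
    have hget : PySem.List.pyGet? grid r = some grid[r.toNat] :=
      PySem.List.pyGet?_eq_some_getElem grid h1 h2
    simp only [expand_col, hget]
    rw [← pvReflects_eq _ _ hc]
    exact h grid[r.toNat] (List.getElem_mem hlt)

-- first-hit search over a list = head of its filter (default -1)
theorem pvColsLoop_eq_filter (grid : List String) (cs : List Int) (p : Int → Bool)
    (hp : ∀ c ∈ cs, pvRowsLoop grid c (PySem.List.pyRange 0 (grid.length : Int) 1) = p c) :
    pvColsLoop grid cs = (match cs.filter p with | [] => -1 | c :: _ => c) := by
  induction cs with
  | nil => rfl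
  | cons c rest ih =>
    have hc := hp c (by simp)
    simp only [pvColsLoop, List.filter_cons, hc]
    by_cases h : p c = true
    · simp only [h, if_true]
    · simp only [h, if_false, Bool.false_eq_true]
      exact ih (fun x hx => hp x (by simp [hx]))

-- a foldl of filters is one filter by the conjunction
theorem pvFoldlFilter (grid : List String) (init : List Int) :
    grid.foldl (fun cand row => cand.filter (fun c => pvReflects row.toList c)) init
      = init.filter (fun c => grid.all (fun row => pvReflects row.toList c)) := by
  induction grid generalizing init with
  | nil => simp
  | cons g rest ih =>
    simp only [List.foldl_cons, ih, List.filter_filter, List.all_cons]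
    congr 1
    funext a
    exact Bool.and_comm _ _

-- ===== VERDICT (by name: the statement is the Claim_ definition above) =====
theorem find_mirror_col_spec : Claim_equal_find_mirror_col := by
  intro grid _ hpre
  unfold Spec_find_mirror_col
  cases grid with
  | nil => exact absurd rfl hpre
  | cons g0 rest =>
    simp only [find_mirror_col, find_mirror_col_alt, PySem.List.pyGet?_zero_cons]
    rw [pvFoldlFilter]
    exact pvColsLoop_eq_filter (g0 :: rest) _ _
      (fun c hcmem => pvRowsLoop_eq_all_rows _ c (PySem.List.mem_pyRange_one.mp hcmem).1)
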